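-- pv_equiv track=rewrite | github.com/HirMtsd/AtCoder | ABC421/abc421c.py | func
-- ===== SOURCE A (Python) =====
-- def func(n, s):
--     # 文字列sの最初の1文字を確認する。
--     f = s[0]
--
--     # 1文字目がAなら調査対象文字tを"A",1文字目がBならtを"B"とする。
--     t = f
--
--     # 最終形はtがすべて偶数の位置にあればいい。
--     # tの位置を調べて、intの配列に確保する。
--     cnt = 0
--     tmp = [0]*n
--     for i in range(n*2):
--         if s[i] == t:
--             tmp[cnt] = i
--             cnt += 1
--
--     # tmp[]のそれぞれの値が本来あるべき位置からどれくらい離れているか確認し、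
--     # 答えに足していく
--     ansa = 0
--     for i in range(n):
--         # i個目がi*2より大きい場合
--         if tmp[i] > i*2:
--            ansa += tmp[i] - i*2
--         # i個目がi*2より小さい場合
--         if tmp[i] < i*2:
--            ansa += i*2 - tmp[i]
--
--     # tmp[]のそれぞれの値が本来あるべき位置からどれくらい離れているか確認し、
--     # 答えに足していく
--     ansb = 0
--     for i in range(n):
--         # i個目がi*2 + 1より大きい場合
--         if tmp[i] > i*2 + 1:
--            ansb += tmp[i] - (i*2 + 1)
--         # i個目がi*2 + 1より小さい場合
--         if tmp[i] < i*2 + 1: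
--            ansb += (i*2 + 1) - tmp[i]
--
--     # 答えを返す
--     return(min(ansa, ansb))
-- ===== SOURCE B (Python) =====
-- def func(n, s):
--     # Balance/CDF formulation: after reading prefix s[:i+1], cnt occurrences of
--     # t have appeared while an evenly-spread arrangement would have i//2+1
--     # (even slots) resp. (i+1)//2 (odd slots); the total prefix imbalance is
--     # exactly the displacement cost (Wasserstein-1 identity on the line).
--     t = s[0]
--     cnt = 0
--     ansa = 0
--     ansb = 0
--     for i in range(2 * n):
--         if s[i] == t:
--             cnt += 1
--         ansa += abs(cnt - (i // 2 + 1))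
--         ansb += abs(cnt - (i + 1) // 2)
--     return min(ansa, ansb)
-- ===== Notes on version B (the rewrite author's own statement) =====
-- stated objective: alternative
-- what changed: A extracts the occurrence positions of s[0] into a table and sums each position's displacement from its target slot 2k (and 2k+1); B never builds or matches positions: it scans once keeping a running occurrence count and charges, at every prefix, the imbalance between that count and the count an evenly-spread arrangement would show (the Wasserstein-1/prefix-balance identity); Pre_ restricts to the problem's natural domain (first 2n chars contain exactly n copies of s[0]), outside it A's zero-filled table slots give an accidental value.
-- outside the precondition, e.g. on func(3, 'AABBBB'): A returns 5, B returns 3; on func(1, 'AAB'): A raises IndexError, B returns 1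
import Mathlib
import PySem

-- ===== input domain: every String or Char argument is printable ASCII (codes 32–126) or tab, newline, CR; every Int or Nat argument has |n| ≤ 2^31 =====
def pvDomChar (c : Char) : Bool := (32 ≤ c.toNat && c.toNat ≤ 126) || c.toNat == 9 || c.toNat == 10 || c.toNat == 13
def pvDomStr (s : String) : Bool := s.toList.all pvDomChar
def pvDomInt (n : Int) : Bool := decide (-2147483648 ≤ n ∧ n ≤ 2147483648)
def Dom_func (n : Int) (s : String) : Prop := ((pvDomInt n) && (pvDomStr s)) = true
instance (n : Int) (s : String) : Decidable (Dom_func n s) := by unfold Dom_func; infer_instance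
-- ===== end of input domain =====

-- B drops A's occurrence-position table and displacement matching entirely: it
-- scans once, charging at every prefix the imbalance between the running count
-- of s[0] and the count an evenly-spread arrangement would show (prefix-balance
-- / Wasserstein-1 identity); objective: alternative algorithm, same O(n) cost.

-- ===== PORT A =====
def func (n : Int) (s : String) : Int :=
  match PySem.Str.pyGet? s 0 with
  | none => 0  -- s[0] raises IndexError on empty s: excluded by Pre_func
  | some t =>
    -- first loop: record the positions of t into tmp ([0]*n), counting with cnt
    -- (s[i] == t ported as 'pyGet? = some t': the out-of-range IndexError and the
    --  tmp[cnt] IndexError at cnt = n are exactly what Pre_func excludes)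
    let p1 := (PySem.List.pyRange 0 (n*2) 1).foldl
      (fun (st : Nat × List Int) i =>
        if PySem.Str.pyGet? s i = some t then (st.1 + 1, st.2.set st.1 i) else st)
      (0, PySem.List.pyRepeat [0] n)
    let tmp := p1.2
    -- second loop: distance of tmp[i] from i*2
    let ansa := (PySem.List.pyRange 0 n 1).foldl
      (fun acc i =>
        let v := PySem.List.pyGetD tmp i 0
        let acc := if v > i*2 then acc + (v - i*2) else acc
        if v < i*2 then acc + (i*2 - v) else acc) 0
    -- third loop: distance of tmp[i] from i*2 + 1
    let ansb := (PySem.List.pyRange 0 n 1).foldl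
      (fun acc i =>
        let v := PySem.List.pyGetD tmp i 0
        let acc := if v > i*2 + 1 then acc + (v - (i*2 + 1)) else acc
        if v < i*2 + 1 then acc + ((i*2 + 1) - v) else acc) 0
    min ansa ansb

-- ===== PORT B =====
def func_alt (n : Int) (s : String) : Int :=
  match PySem.Str.pyGet? s 0 with
  | none => 0  -- s[0] raises IndexError on empty s: excluded by Pre_func
  | some t =>
    -- one scan: cnt occurrences so far vs the i//2+1 (resp. (i+1)//2) an
    -- evenly-spread arrangement would have in the prefix s[:i+1]
    let st := (PySem.List.pyRange 0 (2*n) 1).foldl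
      (fun (st : Int × Int × Int) i =>
        let c := if PySem.Str.pyGet? s i = some t then st.1 + 1 else st.1
        (c, st.2.1 + |c - (PySem.Int.floordiv i 2 + 1)|,
            st.2.2 + |c - PySem.Int.floordiv (i + 1) 2|))
      (0, 0, 0)
    min st.2.1 st.2.2

-- ===== PRECONDITION & SPEC =====
-- Pre_func is the problem's natural domain, where A returns its intended value:
-- a nonempty s, and for n > 0 a string long enough for s[0..2n) (a shorter one
-- makes A raise IndexError) whose first 2n characters contain EXACTLY n copies
-- of s[0] — more make A raise IndexError writing past its length-n table, fewer
-- leave zero-filled table slots whose contribution is an accident of A's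
-- preallocation (B returns the natural prefix-imbalance value there).
def Pre_func (n : Int) (s : String) : Prop :=
  s.toList ≠ [] ∧
    (n ≤ 0 ∨ (n*2 ≤ (s.toList.length : Int) ∧
      (((s.toList.take (n*2).toNat).count (s.toList.headD ' ') : Int) = n)))
instance (n : Int) (s : String) : Decidable (Pre_func n s) := by unfold Pre_func; infer_instance
def pvWitness_func : Int × String := (2, "ABAB")
def Spec_func (n : Int) (s : String) (out : Int) : Prop := out = func_alt n s
instance (n : Int) (s : String) (out : Int) : Decidable (Spec_func n s out) := by unfold Spec_func; infer_instance

-- ===== CLAIM (what is proved, stated in full; the proofs are below) =====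
def Claim_equal_func : Prop := ∀ (n : Int) (s : String), Dom_func n s → Pre_func n s → Spec_func n s (func n s)

-- ===== LEMMAS AND PROOFS =====

-- displacement sum of a position list whose k-th entry targets 2*(c+k)+off
def pvSA : List Int → Int → Int → Int
  | [], _, _ => 0
  | q :: Q, c, off => |q - 2*c - off| + pvSA Q (c+1) off

-- A's first loop writes its matches at consecutive indices c, c+1, … of tmp
def pvWriteAll : List Int → Nat → List Int → List Int
  | tmp, _, [] => tmp
  | tmp, c, p :: P => pvWriteAll (tmp.set c p) (c+1) P

theorem pvSA_snoc (q off : Int) :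
    ∀ (P : List Int) (c : Int),
    pvSA (P ++ [q]) c off = pvSA P c off + |q - 2*(c + (P.length : Int)) - off| := by
  intro P
  induction P with
  | nil => intro c; simp [pvSA]
  | cons p P ih =>
      intro c
      simp only [List.cons_append, pvSA, ih (c + 1), List.length_cons]
      push_cast
      ring_nf

theorem pv_foldA1 (s : String) (t : Char) :
    ∀ (L : List Int) (c : Nat) (tmp : List Int),
    L.foldl (fun (st : Nat × List Int) i =>
        if PySem.Str.pyGet? s i = some t then (st.1 + 1, st.2.set st.1 i) else st)
      (c, tmp)
    = (c + (L.filter (fun i => decide (PySem.Str.pyGet? s i = some t))).length,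
       pvWriteAll tmp c (L.filter (fun i => decide (PySem.Str.pyGet? s i = some t)))) := by
  intro L
  induction L with
  | nil => intro c tmp; simp [pvWriteAll]
  | cons i L ih =>
      intro c tmp
      by_cases hm : PySem.Str.pyGet? s i = some t
      · rw [List.foldl_cons, if_pos hm, ih, List.filter_cons_of_pos (by simpa using hm)]
        simp only [Prod.mk.injEq, pvWriteAll, List.length_cons]
        exact ⟨by omega, trivial⟩
      · rw [List.foldl_cons, if_neg hm, ih, List.filter_cons_of_neg (by simpa using hm)]

theorem pv_set_mid (X Z : List Int) (y p : Int) :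
    (X ++ y :: Z).set X.length p = X ++ p :: Z := by
  induction X with
  | nil => rfl
  | cons x X ih => simp [ih]

theorem pv_writeAll_pad :
    ∀ (P X : List Int) (m : Nat), P.length ≤ m →
    pvWriteAll (X ++ List.replicate m 0) X.length P = (X ++ P) ++ List.replicate (m - P.length) 0 := by
  intro P
  induction P with
  | nil => intro X m _; simp [pvWriteAll]
  | cons p P ih =>
      intro X m hm
      cases m with
      | zero => simp at hm
      | succ k =>
          have hk : P.length ≤ k := by simpa using hm
          simp only [pvWriteAll, List.replicate_succ, pv_set_mid]
          have h1 : X ++ p :: List.replicate k 0 = (X ++ [p]) ++ List.replicate k 0 := by simp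
          have h2 : X.length + 1 = (X ++ [p]).length := by simp
          rw [h1, h2, ih (X ++ [p]) k hk]
          simp [List.length_cons]

theorem pv_absBranch (acc v w : Int) :
    (if v < w then (if v > w then acc + (v - w) else acc) + (w - v)
     else (if v > w then acc + (v - w) else acc)) = acc + |v - w| := by
  rcases lt_trichotomy v w with h | h | h
  · rw [if_pos h, if_neg (by omega), abs_of_neg (by omega)]; ring
  · subst h; simp
  · rw [if_neg (by omega), if_pos h, abs_of_pos (by omega)]

theorem pv_front (off : Int) :
    ∀ (P pad : List Int),
    (((PySem.List.pyRange 0 (P.length : Int) 1).map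
        (fun i => |PySem.List.pyGetD (P ++ pad) i 0 - (i*2 + off)|)).sum)
    = pvSA P 0 off := by
  intro P
  induction P using List.reverseRecOn with
  | nil => intro pad; simp [PySem.List.pyRange_one_eq_nil (by omega : (0:Int) ≤ 0), pvSA]
  | append_singleton P q ih =>
      intro pad
      have hlen : (((P ++ [q]).length : Int)) = (P.length : Int) + 1 := by simp
      rw [hlen, PySem.List.pyRange_one_succ_right (by positivity), List.map_append,
        List.sum_append, List.append_assoc]
      simp only [List.singleton_append]
      rw [ih (q :: pad)]
      have hq : PySem.List.pyGetD (P ++ q :: pad) ((P.length : Int)) 0 = q := by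
        rw [PySem.List.pyGetD_natCast, List.getD_append_right P (q :: pad) 0 P.length le_rfl]
        simp
      rw [pvSA_snoc]
      simp only [List.map_cons, List.map_nil, List.sum_cons, List.sum_nil, hq, add_zero]
      congr 1
      congr 1
      ring

theorem pv_count (cs : List Char) (t : Char) :
    ∀ (m : Nat), m ≤ cs.length →
    ((PySem.List.pyRange 0 (m : Int) 1).filter
        (fun i => decide (PySem.List.pyGet? cs i = some t))).length
    = (cs.take m).count t := by
  intro m
  induction m with
  | zero => intro _; simp [PySem.List.pyRange_one_eq_nil (by omega : (0:Int) ≤ 0)]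
  | succ m ih =>
      intro hm
      have hm' : m ≤ cs.length := Nat.le_of_succ_le hm
      have hmlt : m < cs.length := hm
      have h1 : ((m + 1 : Nat) : Int) = (m : Int) + 1 := by push_cast; ring
      rw [h1, PySem.List.pyRange_one_succ_right (by positivity), List.filter_append,
        List.length_append, ih hm']
      have hg : PySem.List.pyGet? cs ((m : Int)) = some cs[m] := by
        rw [PySem.List.pyGet?_natCast]
        exact List.getElem?_eq_getElem hmlt
      rw [List.take_add_one, List.count_append]
      have ht : cs[m]? = some cs[m] := List.getElem?_eq_getElem hmlt
      by_cases hq : cs[m] = t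
      · simp [hg, hq, ht]
      · simp [hg, hq, ht]

-- A's second loop, in the (zeta-reduced) shape it takes inside func, as a sum
theorem pv_pass2a (tmp : List Int) (n : Int) :
    (PySem.List.pyRange 0 n 1).foldl (fun acc i =>
        if PySem.List.pyGetD tmp i 0 < i*2
        then (if PySem.List.pyGetD tmp i 0 > i*2 then acc + (PySem.List.pyGetD tmp i 0 - i*2) else acc)
             + (i*2 - PySem.List.pyGetD tmp i 0)
        else (if PySem.List.pyGetD tmp i 0 > i*2 then acc + (PySem.List.pyGetD tmp i 0 - i*2) else acc)) 0
    = ((PySem.List.pyRange 0 n 1).map (fun i => |PySem.List.pyGetD tmp i 0 - (i*2 + 0)|)).sum := by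
  rw [PySem.List.foldl_congr_mem _ _
    (fun acc i => acc + |PySem.List.pyGetD tmp i 0 - (i*2 + 0)|) _
    (by intro acc i _; simpa using pv_absBranch acc (PySem.List.pyGetD tmp i 0) (i*2))]
  rw [PySem.List.foldl_add]
  simp

theorem pv_pass2b (tmp : List Int) (n : Int) :
    (PySem.List.pyRange 0 n 1).foldl (fun acc i =>
        if PySem.List.pyGetD tmp i 0 < i*2 + 1
        then (if PySem.List.pyGetD tmp i 0 > i*2 + 1 then acc + (PySem.List.pyGetD tmp i 0 - (i*2 + 1)) else acc)
             + ((i*2 + 1) - PySem.List.pyGetD tmp i 0)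
        else (if PySem.List.pyGetD tmp i 0 > i*2 + 1 then acc + (PySem.List.pyGetD tmp i 0 - (i*2 + 1)) else acc)) 0
    = ((PySem.List.pyRange 0 n 1).map (fun i => |PySem.List.pyGetD tmp i 0 - (i*2 + 1)|)).sum := by
  rw [PySem.List.foldl_congr_mem _ _
    (fun acc i => acc + |PySem.List.pyGetD tmp i 0 - (i*2 + 1)|) _
    (by intro acc i _; simpa using pv_absBranch acc (PySem.List.pyGetD tmp i 0) (i*2 + 1))]
  rw [PySem.List.foldl_add]
  simp

theorem pv_tail_sum (c off : Int) :
    ∀ (m : Nat),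
    ((PySem.List.pyRange c (c + (m : Int)) 1).map (fun i => i*2 + off)).sum
    = (c + m)*(c + m) - c*c + (off - 1)*(m : Int) := by
  intro m
  induction m with
  | zero => simp
  | succ m ih =>
      have h1 : (c + ((m + 1 : Nat) : Int)) = (c + (m : Int)) + 1 := by push_cast; ring
      rw [h1, PySem.List.pyRange_one_succ_right (by omega : c ≤ c + (m : Int)),
        List.map_append, List.sum_append, ih]
      simp only [List.map_cons, List.map_nil, List.sum_cons, List.sum_nil]
      push_cast
      ring

-- the whole A-side displacement sum over the padded table, split at the c-th slot
theorem pv_Aside (F : List Int) (n off : Int) (hoff : 0 ≤ off) (hF : (F.length : Int) ≤ n) :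
    ((PySem.List.pyRange 0 n 1).map
        (fun i => |PySem.List.pyGetD (F ++ List.replicate (n.toNat - F.length) 0) i 0 - (i*2 + off)|)).sum
    = pvSA F 0 off + (n*n - (F.length : Int)*(F.length : Int) + (off - 1)*(n - (F.length : Int))) := by
  have hc0 : (0:Int) ≤ (F.length : Int) := by positivity
  rw [PySem.List.pyRange_one_append 0 (F.length : Int) n hc0 hF, List.map_append, List.sum_append,
    pv_front]
  have htail1 : ((PySem.List.pyRange (F.length : Int) n 1).map
      (fun i => |PySem.List.pyGetD (F ++ List.replicate (n.toNat - F.length) 0) i 0 - (i*2 + off)|))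
      = ((PySem.List.pyRange (F.length : Int) n 1).map (fun i => i*2 + off)) := by
    apply List.map_congr_left
    intro i hi
    rw [PySem.List.mem_pyRange_one] at hi
    have h0i : (0:Int) ≤ i := le_trans hc0 hi.1
    have hgz : PySem.List.pyGetD (F ++ List.replicate (n.toNat - F.length) 0) i 0 = 0 := by
      rw [show i = ((i.toNat : Nat) : Int) by omega, PySem.List.pyGetD_natCast,
        List.getD_append_right F _ 0 i.toNat (by omega)]
      simp only [List.getD, List.getElem?_replicate]
      split <;> simp
    rw [hgz, zero_sub, abs_neg, abs_of_nonneg (by omega)]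
  rw [htail1]
  have hm : n = (F.length : Int) + (((n - (F.length : Int)).toNat : Nat) : Int) := by omega
  rw [hm, pv_tail_sum]
  have : (((n - (F.length : Int)).toNat : Nat) : Int) = n - (F.length : Int) := by omega
  rw [this]
  ring


-- ===== B-side: the prefix-balance (Wasserstein-1) identity =====

-- signed indicator difference of a matched pair (p, q) at threshold i
def pvT (z : Int × Int) (i : Int) : Int :=
  (if z.1 ≤ i then 1 else 0) - (if z.2 ≤ i then 1 else 0)

-- floor-division by 2: the two-sided bracket used by all arithmetic below
theorem pv_fd2 (x : Int) :
    2 * PySem.Int.floordiv x 2 ≤ x ∧ x < 2 * PySem.Int.floordiv x 2 + 2 := by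
  have h := PySem.Int.floordiv_mul_add_mod x 2
  have h2 := PySem.Int.mod_two_eq x
  omega

theorem pv_fd_shift (i : Int) :
    PySem.Int.floordiv (i + 1) 2 = PySem.Int.floordiv (i - 1) 2 + 1 := by
  have h1 := pv_fd2 (i + 1)
  have h2 := pv_fd2 (i - 1)
  omega

-- B's single scan, characterised: count so far, and the two prefix-imbalance sums
theorem pv_foldB (s : String) (t : Char) : ∀ (m : Nat),
    (PySem.List.pyRange 0 (m : Int) 1).foldl
      (fun (st : Int × Int × Int) i =>
        let c := if PySem.Str.pyGet? s i = some t then st.1 + 1 else st.1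
        (c, st.2.1 + |c - (PySem.Int.floordiv i 2 + 1)|,
            st.2.2 + |c - PySem.Int.floordiv (i + 1) 2|))
      (0, 0, 0)
    = ((((PySem.List.pyRange 0 (m : Int) 1).filter
          (fun i => decide (PySem.Str.pyGet? s i = some t))).length : Int),
       ((PySem.List.pyRange 0 (m : Int) 1).map (fun i =>
         |(((PySem.List.pyRange 0 (i + 1) 1).filter
              (fun j => decide (PySem.Str.pyGet? s j = some t))).length : Int)
            - (PySem.Int.floordiv i 2 + 1)|)).sum,
       ((PySem.List.pyRange 0 (m : Int) 1).map (fun i =>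
         |(((PySem.List.pyRange 0 (i + 1) 1).filter
              (fun j => decide (PySem.Str.pyGet? s j = some t))).length : Int)
            - PySem.Int.floordiv (i + 1) 2|)).sum) := by
  intro m
  induction m with
  | zero => simp [PySem.List.pyRange_one_eq_nil (by omega : (0:Int) ≤ 0)]
  | succ m ih =>
      have h1 : ((m + 1 : Nat) : Int) = (m : Int) + 1 := by push_cast; ring
      have h0m : (0:Int) ≤ (m : Int) := by positivity
      rw [h1, PySem.List.pyRange_one_succ_right h0m, List.foldl_append, ih]
      rw [List.filter_append, List.length_append, List.map_append, List.map_append,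
        List.sum_append, List.sum_append]
      simp only [List.foldl_cons, List.foldl_nil, List.map_cons, List.map_nil,
        List.sum_cons, List.sum_nil, add_zero]
      -- expand the inner prefix-range at i = m
      rw [PySem.List.pyRange_one_succ_right h0m, List.filter_append, List.length_append]
      by_cases hm : PySem.Str.pyGet? s ((m : Int)) = some t
      · simp only [hm, List.filter_cons, List.filter_nil, decide_true, ite_true,
          List.length_cons, List.length_nil, Nat.cast_add, Nat.cast_one, Nat.cast_zero]
        refine Prod.ext ?_ (Prod.ext ?_ ?_) <;>
          · push_cast [List.length_nil, List.length_cons]; ring_nf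
      · simp only [hm, List.filter_cons, List.filter_nil, decide_false, ite_false]
        refine Prod.ext ?_ (Prod.ext ?_ ?_) <;>
          · push_cast [List.length_nil, List.length_cons]; ring_nf

-- prefix count = how many recorded positions are ≤ i
theorem pv_cnt_filter (s : String) (t : Char) (M i : Int) (h0 : 0 ≤ i) (hi : i < M) :
    ((PySem.List.pyRange 0 (i + 1) 1).filter
        (fun j => decide (PySem.Str.pyGet? s j = some t))).length
    = (((PySem.List.pyRange 0 M 1).filter
        (fun j => decide (PySem.Str.pyGet? s j = some t))).filter
          (fun p => decide (p ≤ i))).length := by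
  rw [PySem.List.pyRange_one_append 0 (i + 1) M (by omega) (by omega), List.filter_append,
    List.filter_append, List.length_append]
  have hpre : (((PySem.List.pyRange 0 (i + 1) 1).filter
      (fun j => decide (PySem.Str.pyGet? s j = some t))).filter
        (fun p => decide (p ≤ i)))
      = ((PySem.List.pyRange 0 (i + 1) 1).filter
      (fun j => decide (PySem.Str.pyGet? s j = some t))) := by
    apply List.filter_eq_self.2
    intro p hp
    have := PySem.List.mem_pyRange_one.1 (List.mem_of_mem_filter hp)
    simpa using (by omega : p ≤ i)
  have htail : (((PySem.List.pyRange (i + 1) M 1).filter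
      (fun j => decide (PySem.Str.pyGet? s j = some t))).filter
        (fun p => decide (p ≤ i))) = [] := by
    apply List.filter_eq_nil_iff.2
    intro p hp
    have := PySem.List.mem_pyRange_one.1 (List.mem_of_mem_filter hp)
    simpa using (by omega : ¬ p ≤ i)
  rw [hpre, htail]
  simp

-- length of a ≤-filter as a 0/1 sum
theorem pv_len_sum (i : Int) : ∀ (P : List Int),
    ((P.filter (fun p => decide (p ≤ i))).length : Int)
    = (P.map (fun p => if p ≤ i then (1:Int) else 0)).sum := by
  intro P
  induction P with
  | nil => simp
  | cons p P ih =>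
      by_cases hp : p ≤ i
      · rw [List.filter_cons_of_pos (by simpa using hp)]
        simp only [List.map_cons, List.sum_cons, if_pos hp, List.length_cons]
        push_cast
        omega
      · rw [List.filter_cons_of_neg (by simpa using hp)]
        simp only [List.map_cons, List.sum_cons, if_neg hp, ih]
        ring

-- the target prefix count, as a 0/1 sum over the n slots
theorem pv_target (off i : Int) : ∀ (m : Nat),
    ((PySem.List.pyRange 0 (m : Int) 1).map
        (fun k => if 2*k + off ≤ i then (1:Int) else 0)).sum
    = min (m : Int) (max 0 (PySem.Int.floordiv (i - off) 2 + 1)) := by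
  intro m
  induction m with
  | zero => simp [PySem.List.pyRange_one_eq_nil (by omega : (0:Int) ≤ 0)]
  | succ m ih =>
      have h1 : ((m + 1 : Nat) : Int) = (m : Int) + 1 := by push_cast; ring
      rw [h1, PySem.List.pyRange_one_succ_right (by positivity), List.map_append,
        List.sum_append, ih]
      have hd := pv_fd2 (i - off)
      simp only [List.map_cons, List.map_nil, List.sum_cons, List.sum_nil, add_zero]
      split_ifs with h <;> omega

-- equal-length sums subtract pointwise along the zip
theorem pv_zip_sub (f g : Int → Int) : ∀ (P Q : List Int), P.length = Q.length →
    (P.map f).sum - (Q.map g).sum = ((P.zip Q).map (fun z => f z.1 - g z.2)).sum := by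
  intro P
  induction P with
  | nil => intro Q hQ; rw [List.length_nil] at hQ; rw [List.eq_nil_of_length_eq_zero hQ.symm]; simp
  | cons p P ih =>
      intro Q hQ
      cases Q with
      | nil => simp at hQ
      | cons q Q =>
          simp only [List.map_cons, List.sum_cons, List.zip_cons_cons]
          rw [← ih Q (by simpa using hQ)]
          ring

-- with both sides sorted, the pair indicators never disagree in sign at one threshold
theorem pv_no_mixed (i : Int) : ∀ (Z : List (Int × Int)),
    Z.Pairwise (fun a b => a.1 < b.1 ∧ a.2 < b.2) →
    (∀ z ∈ Z, 0 ≤ pvT z i) ∨ (∀ z ∈ Z, pvT z i ≤ 0) := by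
  intro Z
  induction Z with
  | nil => intro _; left; simp
  | cons z Z ih =>
      intro hpw
      rw [List.pairwise_cons] at hpw
      obtain ⟨hz, hZ⟩ := hpw
      by_cases h1 : z.1 ≤ i <;> by_cases h2 : z.2 ≤ i
      · -- head term 0: keep whichever side the tail has
        rcases ih hZ with h | h
        · left; intro w hw
          rcases List.mem_cons.1 hw with rfl | hw
          · simp [pvT, h1, h2]
          · exact h w hw
        · right; intro w hw
          rcases List.mem_cons.1 hw with rfl | hw
          · simp [pvT, h1, h2]
          · exact h w hw
      · -- head +1: every later pair has z'.2 > z.2 > i, so its term is ≥ 0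
        left; intro w hw
        rcases List.mem_cons.1 hw with rfl | hw
        · simp [pvT, h1, h2]
        · have := (hz w hw).2
          have hw2 : ¬ w.2 ≤ i := by omega
          simp only [pvT, hw2, if_false]
          split_ifs <;> omega
      · -- head -1: every later pair has z'.1 > z.1 > i, so its term is ≤ 0
        right; intro w hw
        rcases List.mem_cons.1 hw with rfl | hw
        · simp [pvT, h1, h2]
        · have := (hz w hw).1
          have hw1 : ¬ w.1 ≤ i := by omega
          simp only [pvT, hw1, if_false]
          split_ifs <;> omega
      · -- head term 0 again
        rcases ih hZ with h | h
        · left; intro w hw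
          rcases List.mem_cons.1 hw with rfl | hw
          · simp [pvT, h1, h2]
          · exact h w hw
        · right; intro w hw
          rcases List.mem_cons.1 hw with rfl | hw
          · simp [pvT, h1, h2]
          · exact h w hw

theorem pv_sum_neg : ∀ (l : List Int), (l.map (fun x => -x)).sum = -l.sum := by
  intro l
  induction l with
  | nil => simp
  | cons x l ih => simp [ih]; ring

-- a same-signed sum moves through the absolute value
theorem pv_abs_sum (l : List Int)
    (h : (∀ x ∈ l, 0 ≤ x) ∨ (∀ x ∈ l, x ≤ 0)) :
    |l.sum| = (l.map (fun x => |x|)).sum := by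
  rcases h with h | h
  · rw [abs_of_nonneg (List.sum_nonneg h)]
    rw [List.map_congr_left (fun x hx => abs_of_nonneg (h x hx))]
    simp
  · have h2 : 0 ≤ (l.map (fun x => -x)).sum := List.sum_nonneg (by
      intro x hx
      obtain ⟨y, hy, rfl⟩ := List.mem_map.1 hx
      have := h y hy
      omega)
    rw [pv_sum_neg] at h2
    rw [abs_of_nonpos (by omega)]
    rw [List.map_congr_left (fun x hx => abs_of_nonpos (h x hx)), pv_sum_neg]

-- exchange the two finite sums
theorem pv_sum_map_add (a b : (Int × Int) → Int) : ∀ (Z : List (Int × Int)),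
    (Z.map (fun z => a z + b z)).sum = (Z.map a).sum + (Z.map b).sum := by
  intro Z
  induction Z with
  | nil => simp
  | cons z Z ih => simp [ih]; ring

theorem pv_sum_comm (g : (Int × Int) → Int → Int) :
    ∀ (L : List Int) (Z : List (Int × Int)),
    (L.map (fun i => (Z.map (fun z => g z i)).sum)).sum
    = (Z.map (fun z => (L.map (fun i => g z i)).sum)).sum := by
  intro L
  induction L with
  | nil => intro Z; simp
  | cons i L ih =>
      intro Z
      simp only [List.map_cons, List.sum_cons, ih]
      rw [← pv_sum_map_add (fun z => g z i) (fun z => (L.map (fun j => g z j)).sum)]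

-- sum of an interval indicator over range(0, m)
theorem pv_ind_sum (a b : Int) (ha : 0 ≤ a) (hab : a ≤ b) : ∀ (m : Nat),
    ((PySem.List.pyRange 0 (m : Int) 1).map
        (fun i => if a ≤ i ∧ i < b then (1:Int) else 0)).sum
    = min b (m : Int) - min a (m : Int) := by
  intro m
  induction m with
  | zero => simp [PySem.List.pyRange_one_eq_nil (by omega : (0:Int) ≤ 0)]; omega
  | succ m ih =>
      have h1 : ((m + 1 : Nat) : Int) = (m : Int) + 1 := by push_cast; ring
      rw [h1, PySem.List.pyRange_one_succ_right (by positivity), List.map_append,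
        List.sum_append, ih]
      simp only [List.map_cons, List.map_nil, List.sum_cons, List.sum_nil, add_zero]
      split_ifs with h <;> omega

-- per matched pair, the thresholds it unbalances count its distance
theorem pv_pair_sum (p q : Int) (hp0 : 0 ≤ p) (hq0 : 0 ≤ q) (m : Nat)
    (hpm : p < (m : Int)) (hqm : q < (m : Int)) :
    ((PySem.List.pyRange 0 (m : Int) 1).map (fun i => |pvT (p, q) i|)).sum = |p - q| := by
  have hpt : ∀ i : Int, |pvT (p, q) i| = if min p q ≤ i ∧ i < max p q then (1:Int) else 0 := by
    intro i
    by_cases h1 : p ≤ i <;> by_cases h2 : q ≤ i <;>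
      split_ifs with h3 <;> simp [pvT, h1, h2] <;> omega
  rw [List.map_congr_left (fun i _ => hpt i)]
  rw [pv_ind_sum (min p q) (max p q) (by omega) (by omega) m]
  rcases le_total p q with h | h
  · rw [abs_of_nonpos (by omega)]; omega
  · rw [abs_of_nonneg (by omega)]; omega

-- the zipped distances are exactly the displacement sum pvSA
theorem pv_zip_pvSA (off : Int) : ∀ (P : List Int) (c : Int),
    ((P.zip ((PySem.List.pyRange c (c + (P.length : Int)) 1).map
        (fun k => 2*k + off))).map (fun z => |z.1 - z.2|)).sum
    = pvSA P c off := by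
  intro P
  induction P with
  | nil => intro c; simp [pvSA]
  | cons p P ih =>
      intro c
      have hlen : c + (((p :: P).length : Nat) : Int) = (c + 1) + (P.length : Int) := by
        push_cast [List.length_cons]; ring
      rw [hlen, PySem.List.pyRange_one_cons (by omega),
        List.map_cons, List.zip_cons_cons, List.map_cons, List.sum_cons, ih (c + 1)]
      simp only [pvSA]
      congr 1
      rw [sub_add_eq_sub_sub]

theorem pv_mem_zip : ∀ (P Q : List Int) (z : Int × Int), z ∈ P.zip Q → z.1 ∈ P ∧ z.2 ∈ Q := by
  intro P
  induction P with
  | nil => intro Q z hz; simp at hz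
  | cons p P ih =>
      intro Q z hz
      cases Q with
      | nil => simp at hz
      | cons q Q =>
          rw [List.zip_cons_cons, List.mem_cons] at hz
          rcases hz with rfl | hz
          · simp
          · have := ih Q z hz
            simp [List.mem_cons]
            tauto

-- sorted (componentwise) zip of two strictly increasing lists
theorem pv_pairwise_zip : ∀ (P Q : List Int),
    P.Pairwise (· < ·) → Q.Pairwise (· < ·) →
    (P.zip Q).Pairwise (fun a b : Int × Int => a.1 < b.1 ∧ a.2 < b.2) := by
  intro P
  induction P with
  | nil => intro Q _ _; simp
  | cons p P ih =>
      intro Q hP hQ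
      cases Q with
      | nil => simp
      | cons q Q =>
          rw [List.pairwise_cons] at hP hQ
          rw [List.zip_cons_cons, List.pairwise_cons]
          refine ⟨?_, ih Q hP.2 hQ.2⟩
          intro z hz
          obtain ⟨hz1, hz2⟩ := pv_mem_zip P Q z hz
          exact ⟨hP.1 _ hz1, hQ.1 _ hz2⟩

-- one prefix-imbalance sum equals the displacement sum of variant 'off'
theorem pv_Bside (s : String) (t : Char) (n off : Int) (hn : 0 < n)
    (h0 : 0 ≤ off) (h1 : off ≤ 1)
    (hF : (((PySem.List.pyRange 0 (2*n) 1).filter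
        (fun j => decide (PySem.Str.pyGet? s j = some t))).length : Int) = n) :
    ((PySem.List.pyRange 0 (2*n) 1).map (fun i =>
        |(((PySem.List.pyRange 0 (i + 1) 1).filter
            (fun j => decide (PySem.Str.pyGet? s j = some t))).length : Int)
          - (PySem.Int.floordiv (i - off) 2 + 1)|)).sum
    = pvSA ((PySem.List.pyRange 0 (2*n) 1).filter
        (fun j => decide (PySem.Str.pyGet? s j = some t))) 0 off := by
  set F := (PySem.List.pyRange 0 (2*n) 1).filter
      (fun j => decide (PySem.Str.pyGet? s j = some t)) with hFdef
  set Q := (PySem.List.pyRange 0 n 1).map (fun k => 2*k + off) with hQdef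
  have hlenQ : Q.length = n.toNat := by
    rw [hQdef, List.length_map, PySem.List.length_pyRange_one]; omega
  have hlenF : F.length = n.toNat := by omega
  have hZpw : (F.zip Q).Pairwise (fun a b : Int × Int => a.1 < b.1 ∧ a.2 < b.2) := by
    apply pv_pairwise_zip
    · exact (PySem.List.pairwise_lt_pyRange_one 0 (2*n)).filter _
    · exact (PySem.List.pairwise_lt_pyRange_one 0 n).map _ (by intro a b hab; omega)
  -- rewrite each threshold's term as the zipped same-signed indicator sum
  have hterm : ∀ i ∈ PySem.List.pyRange 0 (2*n) 1,
      |(((PySem.List.pyRange 0 (i + 1) 1).filter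
          (fun j => decide (PySem.Str.pyGet? s j = some t))).length : Int)
        - (PySem.Int.floordiv (i - off) 2 + 1)|
      = ((F.zip Q).map (fun z => |pvT z i|)).sum := by
    intro i hi
    rw [PySem.List.mem_pyRange_one] at hi
    have hcnt : (((PySem.List.pyRange 0 (i + 1) 1).filter
        (fun j => decide (PySem.Str.pyGet? s j = some t))).length : Int)
        = (F.map (fun p => if p ≤ i then (1:Int) else 0)).sum := by
      rw [pv_cnt_filter s t (2*n) i hi.1 hi.2, ← hFdef, ← pv_len_sum]
    have htgt : PySem.Int.floordiv (i - off) 2 + 1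
        = (Q.map (fun q => if q ≤ i then (1:Int) else 0)).sum := by
      have hnn : n = ((n.toNat : Nat) : Int) := by omega
      rw [hQdef, List.map_map]
      have := pv_target off i n.toNat
      rw [← hnn] at this
      have hd := pv_fd2 (i - off)
      rw [show ((fun q => if q ≤ i then (1:Int) else 0) ∘ (fun k => 2*k + off))
            = (fun k => if 2*k + off ≤ i then (1:Int) else 0) from rfl, this]
      omega
    rw [hcnt, htgt, pv_zip_sub _ _ F Q (by omega)]
    have habs := pv_abs_sum ((F.zip Q).map (fun z => pvT z i))
      (by rcases pv_no_mixed i (F.zip Q) hZpw with h | h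
          · left; intro x hx; obtain ⟨z, hz, rfl⟩ := List.mem_map.1 hx; exact h z hz
          · right; intro x hx; obtain ⟨z, hz, rfl⟩ := List.mem_map.1 hx; exact h z hz)
    rw [show ((F.zip Q).map (fun z => (if z.1 ≤ i then (1:Int) else 0) - (if z.2 ≤ i then 1 else 0)))
          = ((F.zip Q).map (fun z => pvT z i)) from rfl, habs, List.map_map]
    rfl
  rw [List.map_congr_left hterm, pv_sum_comm (fun z i => |pvT z i|)]
  -- each pair contributes its distance
  have hM : (2*n) = (((2*n).toNat : Nat) : Int) := by omega
  have hpair : ∀ z ∈ F.zip Q,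
      ((PySem.List.pyRange 0 (2*n) 1).map (fun i => |pvT z i|)).sum = |z.1 - z.2| := by
    intro z hz
    obtain ⟨hz1, hz2⟩ := pv_mem_zip F Q z hz
    have hp := PySem.List.mem_pyRange_one.1 (List.mem_of_mem_filter (hFdef ▸ hz1))
    obtain ⟨k, hk, hq⟩ := List.mem_map.1 (hQdef ▸ hz2)
    rw [PySem.List.mem_pyRange_one] at hk
    obtain ⟨z1, z2⟩ := z
    rw [hM, pv_pair_sum z1 z2 (by omega) (by omega) (2*n).toNat (by omega) (by omega)]
  rw [List.map_congr_left hpair]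
  have hc0 : (0:Int) + (F.length : Int) = n := by omega
  rw [← pv_zip_pvSA off F 0]
  rw [hc0]

theorem pv_main (n : Int) (s : String) (hpre : Pre_func n s) : func n s = func_alt n s := by
  obtain ⟨hne, hcase⟩ := hpre
  cases hcs : s.toList with
  | nil => exact absurd hcs hne
  | cons f rest =>
    have hget0 : PySem.Str.pyGet? s 0 = some f := by
      simp [PySem.Str.pyGet?_eq, hcs]
    simp only [func, func_alt, hget0]
    by_cases hn : n ≤ 0
    · have hr1 : PySem.List.pyRange 0 (n*2) 1 = [] := PySem.List.pyRange_one_eq_nil (by omega)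
      have hr2 : PySem.List.pyRange 0 n 1 = [] := PySem.List.pyRange_one_eq_nil (by omega)
      have hr3 : PySem.List.pyRange 0 (2*n) 1 = [] := PySem.List.pyRange_one_eq_nil (by omega)
      simp [hr1, hr2, hr3]
    · rw [not_le] at hn
      rcases hcase with h | ⟨h2n, hcnt⟩
      · omega
      · rw [hcs] at h2n hcnt
        simp only [List.headD_cons] at hcnt
        rw [show n*2 = 2*n from mul_comm n 2] at h2n hcnt ⊢
        rw [pv_foldA1 s f]
        have hM : (2*n : Int) = ((((2*n).toNat) : Nat) : Int) := by omega
        set F := ((PySem.List.pyRange 0 (2*n) 1).filter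
          (fun i => decide (PySem.Str.pyGet? s i = some f))) with hFdef
        have hmle : (2*n).toNat ≤ (f :: rest).length := by omega
        have hFcnt : F.length = ((f :: rest).take (2*n).toNat).count f := by
          rw [hFdef]
          have hpredEq : (fun i => decide (PySem.Str.pyGet? s i = some f))
              = (fun i => decide (PySem.List.pyGet? (f :: rest) i = some f)) := by
            funext i
            rw [PySem.Str.pyGet?_eq, hcs]
            simp
          rw [hpredEq, hM]
          exact pv_count (f :: rest) f (2*n).toNat hmle
        have hFlen : ((F.length : Int)) = n := by rw [hFcnt]; exact hcnt
        have hFle : ((F.length : Int)) ≤ n := le_of_eq hFlen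
        have hFleN : F.length ≤ n.toNat := by omega
        have htmp : pvWriteAll (PySem.List.pyRepeat [0] n) 0 F
            = F ++ List.replicate (n.toNat - F.length) 0 := by
          rw [PySem.List.pyRepeat_singleton]
          have := pv_writeAll_pad F [] n.toNat hFleN
          simpa using this
        simp only [htmp]
        rw [pv_pass2a, pv_pass2b, pv_Aside F n 0 (by omega) hFle, pv_Aside F n 1 (by omega) hFle]
        -- B side: characterise the single scan, then apply the balance identity
        have hB0 := pv_Bside s f n 0 hn (by omega) (by omega) (hFdef ▸ hFlen)
        have hB1 := pv_Bside s f n 1 hn (by omega) (by omega) (hFdef ▸ hFlen)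
        simp only [sub_zero] at hB0
        simp only [← pv_fd_shift] at hB1
        rw [hM, pv_foldB s f, ← hM]
        rw [← hFdef] at hB0 hB1
        rw [hB0, hB1]
        -- A side: with exactly n occurrences the padded tail is empty
        have hA0 : pvSA F 0 0 + (n*n - (F.length : Int)*(F.length : Int)
            + (0 - 1)*(n - (F.length : Int))) = pvSA F 0 0 := by rw [hFlen]; ring
        have hA1 : pvSA F 0 1 + (n*n - (F.length : Int)*(F.length : Int)
            + (1 - 1)*(n - (F.length : Int))) = pvSA F 0 1 := by rw [hFlen]; ring
        rw [hA0, hA1]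

-- ===== VERDICT (by name: the statement is the Claim_ definition above) =====
theorem func_spec : Claim_equal_func := by
  intro n s _ hpre
  unfold Spec_func
  exact pv_main n s hpre
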